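-- pv_equiv track=rewrite | github.com/StefanAvra/madlove | scores.py | get_place
-- ===== SOURCE A (Python) =====
-- import operator
--
-- highscores = [('Errol', 323), ('Scabbers', 444), ('Severus', 400), ('Irma', 333), ('Granger', 500), ('Grawp', 44),
--               ('Umbridge', 77), ('Rosmerta', 555),
--               ('Krum', 2111), ('Elphias', 8)]
--
-- def get_place(new):
--     score_list = highscores.copy()
--     score_list.append(('$new', new))
--     score_list.sort(key=operator.itemgetter(1), reverse=True)
--     score_list = [score[0] for score in score_list]
--     place = score_list.index('$new') + 1
--     place_string = ''
--     if place in [4, 5, 6, 7, 8, 9, 10]: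
--         place_string = '{}th'.format(place)
--     elif place is 1:
--         place_string = '1st'
--     elif place is 2:
--         place_string = '2nd'
--     elif place is 3:
--         place_string = '3rd'
--     return place_string.upper(), place
-- ===== SOURCE B (Python) =====
-- highscores = [('Errol', 323), ('Scabbers', 444), ('Severus', 400), ('Irma', 333), ('Granger', 500), ('Grawp', 44),
--               ('Umbridge', 77), ('Rosmerta', 555),
--               ('Krum', 2111), ('Elphias', 8)]
--
-- def get_place(new):
--     # rank directly: entries with score >= new come ahead of the new score
--     place = 1 + sum(1 for _, s in highscores if s >= new)
--     if place == 1: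
--         place_string = '1ST'
--     elif place == 2:
--         place_string = '2ND'
--     elif place == 3:
--         place_string = '3RD'
--     elif place <= 10:
--         place_string = '{}TH'.format(place)
--     else:
--         place_string = ''
--     return place_string, place
-- ===== Notes on version B (the rewrite author's own statement) =====
-- stated objective: simpler
-- what changed: B computes the rank directly by counting highscore entries with score >= new and adding one (ties go ahead of the new score, matching A's stable-sort placement of the appended entry), replacing A's copy/append/sort/index pipeline; the ordinal string is picked by a plain if-chain with uppercase literals.
import Mathlib
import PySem

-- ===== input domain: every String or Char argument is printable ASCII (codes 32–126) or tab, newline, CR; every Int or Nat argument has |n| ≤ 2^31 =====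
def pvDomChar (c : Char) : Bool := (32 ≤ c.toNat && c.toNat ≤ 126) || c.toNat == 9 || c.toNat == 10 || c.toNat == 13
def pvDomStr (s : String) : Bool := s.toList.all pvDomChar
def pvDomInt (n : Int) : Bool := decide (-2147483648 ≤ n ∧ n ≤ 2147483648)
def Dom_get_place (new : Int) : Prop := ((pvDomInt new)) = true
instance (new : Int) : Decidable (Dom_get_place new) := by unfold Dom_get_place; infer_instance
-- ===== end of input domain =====

-- B computes the rank directly by counting scores ≤-compared against new, instead of copy/append/sort/index (simpler).

-- ===== PORT A =====
def pvHighscores : List (String × Int) :=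
  [("Errol", 323), ("Scabbers", 444), ("Severus", 400), ("Irma", 333), ("Granger", 500),
   ("Grawp", 44), ("Umbridge", 77), ("Rosmerta", 555), ("Krum", 2111), ("Elphias", 8)]

def get_place (new : Int) : String × Int :=
  let score_list := pvHighscores ++ [("$new", new)]
  let sorted := PySem.List.sorted score_list (fun p => p.2) true
  let names := sorted.map (fun p => p.1)
  -- '$new' is always present, so list.index cannot raise; the getD 0 default is unreachable
  let place : Int := ((PySem.List.index? names "$new").getD 0 : Nat) + 1
  let place_string : String :=
    if place ∈ ([4,5,6,7,8,9,10] : List Int) then PySem.Int.toStr place ++ "th"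
    else if place = 1 then "1st"
    else if place = 2 then "2nd"
    else if place = 3 then "3rd"
    else ""
  (PySem.Str.upper place_string, place)

-- ===== PORT B =====
def get_place_alt (new : Int) : String × Int :=
  let place : Int := 1 + pvHighscores.foldl (fun acc p => if p.2 ≥ new then acc + 1 else acc) 0
  let place_string : String :=
    if place = 1 then "1ST"
    else if place = 2 then "2ND"
    else if place = 3 then "3RD"
    else if place ≤ 10 then PySem.Int.toStr place ++ "TH"
    else ""
  (place_string, place)

-- ===== PRECONDITION & SPEC =====
def Spec_get_place (new : Int) (out : String × Int) : Prop := out = get_place_alt new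
instance (new : Int) (out : String × Int) : Decidable (Spec_get_place new out) := by unfold Spec_get_place; infer_instance

-- ===== CLAIM (what is proved, stated in full; the proofs are below) =====
def Claim_equal_get_place : Prop := ∀ (new : Int), Dom_get_place new → Spec_get_place new (get_place new)

-- ===== LEMMAS AND PROOFS =====

theorem pvA0 (new : Int) (h2 : new ≤ 8) : get_place new = ("", 11) := by
  have cA0 : ¬((2111:Int) < new) := by omega
  have cA1 : ¬((555:Int) < new) := by omega
  have cA2 : ¬((500:Int) < new) := by omega
  have cA3 : ¬((444:Int) < new) := by omega
  have cA4 : ¬((400:Int) < new) := by omega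
  have cA5 : ¬((333:Int) < new) := by omega
  have cA6 : ¬((323:Int) < new) := by omega
  have cA7 : ¬((77:Int) < new) := by omega
  have cA8 : ¬((44:Int) < new) := by omega
  have cA9 : ¬((8:Int) < new) := by omega
  simp [get_place, pvHighscores, PySem.List.sorted_rev_eq_foldl_insertBy, PySem.List.insertBy,
    cA0,cA1,cA2,cA3,cA4,cA5,cA6,cA7,cA8,cA9, PySem.List.index?]
  try decide

theorem pvB0 (new : Int) (h2 : new ≤ 8) : get_place_alt new = ("", 11) := by
  have cB0 : (new ≤ (2111:Int)) := by omega
  have cB1 : (new ≤ (555:Int)) := by omega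
  have cB2 : (new ≤ (500:Int)) := by omega
  have cB3 : (new ≤ (444:Int)) := by omega
  have cB4 : (new ≤ (400:Int)) := by omega
  have cB5 : (new ≤ (333:Int)) := by omega
  have cB6 : (new ≤ (323:Int)) := by omega
  have cB7 : (new ≤ (77:Int)) := by omega
  have cB8 : (new ≤ (44:Int)) := by omega
  have cB9 : (new ≤ (8:Int)) := by omega
  simp [get_place_alt, pvHighscores, cB0,cB1,cB2,cB3,cB4,cB5,cB6,cB7,cB8,cB9]
  try decide

theorem pvA1 (new : Int) (h1 : 8 < new) (h2 : new ≤ 44) : get_place new = ("10TH", 10) := by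
  have cA0 : ¬((2111:Int) < new) := by omega
  have cA1 : ¬((555:Int) < new) := by omega
  have cA2 : ¬((500:Int) < new) := by omega
  have cA3 : ¬((444:Int) < new) := by omega
  have cA4 : ¬((400:Int) < new) := by omega
  have cA5 : ¬((333:Int) < new) := by omega
  have cA6 : ¬((323:Int) < new) := by omega
  have cA7 : ¬((77:Int) < new) := by omega
  have cA8 : ¬((44:Int) < new) := by omega
  have cA9 : ((8:Int) < new) := by omega
  simp [get_place, pvHighscores, PySem.List.sorted_rev_eq_foldl_insertBy, PySem.List.insertBy,
    cA0,cA1,cA2,cA3,cA4,cA5,cA6,cA7,cA8,cA9, PySem.List.index?]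
  try decide

theorem pvB1 (new : Int) (h1 : 8 < new) (h2 : new ≤ 44) : get_place_alt new = ("10TH", 10) := by
  have cB0 : (new ≤ (2111:Int)) := by omega
  have cB1 : (new ≤ (555:Int)) := by omega
  have cB2 : (new ≤ (500:Int)) := by omega
  have cB3 : (new ≤ (444:Int)) := by omega
  have cB4 : (new ≤ (400:Int)) := by omega
  have cB5 : (new ≤ (333:Int)) := by omega
  have cB6 : (new ≤ (323:Int)) := by omega
  have cB7 : (new ≤ (77:Int)) := by omega
  have cB8 : (new ≤ (44:Int)) := by omega
  have cB9 : ¬(new ≤ (8:Int)) := by omega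
  simp [get_place_alt, pvHighscores, cB0,cB1,cB2,cB3,cB4,cB5,cB6,cB7,cB8,cB9]
  try decide

theorem pvA2 (new : Int) (h1 : 44 < new) (h2 : new ≤ 77) : get_place new = ("9TH", 9) := by
  have cA0 : ¬((2111:Int) < new) := by omega
  have cA1 : ¬((555:Int) < new) := by omega
  have cA2 : ¬((500:Int) < new) := by omega
  have cA3 : ¬((444:Int) < new) := by omega
  have cA4 : ¬((400:Int) < new) := by omega
  have cA5 : ¬((333:Int) < new) := by omega
  have cA6 : ¬((323:Int) < new) := by omega
  have cA7 : ¬((77:Int) < new) := by omega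
  have cA8 : ((44:Int) < new) := by omega
  have cA9 : ((8:Int) < new) := by omega
  simp [get_place, pvHighscores, PySem.List.sorted_rev_eq_foldl_insertBy, PySem.List.insertBy,
    cA0,cA1,cA2,cA3,cA4,cA5,cA6,cA7,cA8,cA9, PySem.List.index?]
  try decide

theorem pvB2 (new : Int) (h1 : 44 < new) (h2 : new ≤ 77) : get_place_alt new = ("9TH", 9) := by
  have cB0 : (new ≤ (2111:Int)) := by omega
  have cB1 : (new ≤ (555:Int)) := by omega
  have cB2 : (new ≤ (500:Int)) := by omega
  have cB3 : (new ≤ (444:Int)) := by omega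
  have cB4 : (new ≤ (400:Int)) := by omega
  have cB5 : (new ≤ (333:Int)) := by omega
  have cB6 : (new ≤ (323:Int)) := by omega
  have cB7 : (new ≤ (77:Int)) := by omega
  have cB8 : ¬(new ≤ (44:Int)) := by omega
  have cB9 : ¬(new ≤ (8:Int)) := by omega
  simp [get_place_alt, pvHighscores, cB0,cB1,cB2,cB3,cB4,cB5,cB6,cB7,cB8,cB9]
  try decide

theorem pvA3 (new : Int) (h1 : 77 < new) (h2 : new ≤ 323) : get_place new = ("8TH", 8) := by
  have cA0 : ¬((2111:Int) < new) := by omega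
  have cA1 : ¬((555:Int) < new) := by omega
  have cA2 : ¬((500:Int) < new) := by omega
  have cA3 : ¬((444:Int) < new) := by omega
  have cA4 : ¬((400:Int) < new) := by omega
  have cA5 : ¬((333:Int) < new) := by omega
  have cA6 : ¬((323:Int) < new) := by omega
  have cA7 : ((77:Int) < new) := by omega
  have cA8 : ((44:Int) < new) := by omega
  have cA9 : ((8:Int) < new) := by omega
  simp [get_place, pvHighscores, PySem.List.sorted_rev_eq_foldl_insertBy, PySem.List.insertBy,
    cA0,cA1,cA2,cA3,cA4,cA5,cA6,cA7,cA8,cA9, PySem.List.index?]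
  try decide

theorem pvB3 (new : Int) (h1 : 77 < new) (h2 : new ≤ 323) : get_place_alt new = ("8TH", 8) := by
  have cB0 : (new ≤ (2111:Int)) := by omega
  have cB1 : (new ≤ (555:Int)) := by omega
  have cB2 : (new ≤ (500:Int)) := by omega
  have cB3 : (new ≤ (444:Int)) := by omega
  have cB4 : (new ≤ (400:Int)) := by omega
  have cB5 : (new ≤ (333:Int)) := by omega
  have cB6 : (new ≤ (323:Int)) := by omega
  have cB7 : ¬(new ≤ (77:Int)) := by omega
  have cB8 : ¬(new ≤ (44:Int)) := by omega
  have cB9 : ¬(new ≤ (8:Int)) := by omega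
  simp [get_place_alt, pvHighscores, cB0,cB1,cB2,cB3,cB4,cB5,cB6,cB7,cB8,cB9]
  try decide

theorem pvA4 (new : Int) (h1 : 323 < new) (h2 : new ≤ 333) : get_place new = ("7TH", 7) := by
  have cA0 : ¬((2111:Int) < new) := by omega
  have cA1 : ¬((555:Int) < new) := by omega
  have cA2 : ¬((500:Int) < new) := by omega
  have cA3 : ¬((444:Int) < new) := by omega
  have cA4 : ¬((400:Int) < new) := by omega
  have cA5 : ¬((333:Int) < new) := by omega
  have cA6 : ((323:Int) < new) := by omega
  have cA7 : ((77:Int) < new) := by omega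
  have cA8 : ((44:Int) < new) := by omega
  have cA9 : ((8:Int) < new) := by omega
  simp [get_place, pvHighscores, PySem.List.sorted_rev_eq_foldl_insertBy, PySem.List.insertBy,
    cA0,cA1,cA2,cA3,cA4,cA5,cA6,cA7,cA8,cA9, PySem.List.index?]
  try decide

theorem pvB4 (new : Int) (h1 : 323 < new) (h2 : new ≤ 333) : get_place_alt new = ("7TH", 7) := by
  have cB0 : (new ≤ (2111:Int)) := by omega
  have cB1 : (new ≤ (555:Int)) := by omega
  have cB2 : (new ≤ (500:Int)) := by omega
  have cB3 : (new ≤ (444:Int)) := by omega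
  have cB4 : (new ≤ (400:Int)) := by omega
  have cB5 : (new ≤ (333:Int)) := by omega
  have cB6 : ¬(new ≤ (323:Int)) := by omega
  have cB7 : ¬(new ≤ (77:Int)) := by omega
  have cB8 : ¬(new ≤ (44:Int)) := by omega
  have cB9 : ¬(new ≤ (8:Int)) := by omega
  simp [get_place_alt, pvHighscores, cB0,cB1,cB2,cB3,cB4,cB5,cB6,cB7,cB8,cB9]
  try decide

theorem pvA5 (new : Int) (h1 : 333 < new) (h2 : new ≤ 400) : get_place new = ("6TH", 6) := by
  have cA0 : ¬((2111:Int) < new) := by omega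
  have cA1 : ¬((555:Int) < new) := by omega
  have cA2 : ¬((500:Int) < new) := by omega
  have cA3 : ¬((444:Int) < new) := by omega
  have cA4 : ¬((400:Int) < new) := by omega
  have cA5 : ((333:Int) < new) := by omega
  have cA6 : ((323:Int) < new) := by omega
  have cA7 : ((77:Int) < new) := by omega
  have cA8 : ((44:Int) < new) := by omega
  have cA9 : ((8:Int) < new) := by omega
  simp [get_place, pvHighscores, PySem.List.sorted_rev_eq_foldl_insertBy, PySem.List.insertBy,
    cA0,cA1,cA2,cA3,cA4,cA5,cA6,cA7,cA8,cA9, PySem.List.index?]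
  try decide

theorem pvB5 (new : Int) (h1 : 333 < new) (h2 : new ≤ 400) : get_place_alt new = ("6TH", 6) := by
  have cB0 : (new ≤ (2111:Int)) := by omega
  have cB1 : (new ≤ (555:Int)) := by omega
  have cB2 : (new ≤ (500:Int)) := by omega
  have cB3 : (new ≤ (444:Int)) := by omega
  have cB4 : (new ≤ (400:Int)) := by omega
  have cB5 : ¬(new ≤ (333:Int)) := by omega
  have cB6 : ¬(new ≤ (323:Int)) := by omega
  have cB7 : ¬(new ≤ (77:Int)) := by omega
  have cB8 : ¬(new ≤ (44:Int)) := by omega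
  have cB9 : ¬(new ≤ (8:Int)) := by omega
  simp [get_place_alt, pvHighscores, cB0,cB1,cB2,cB3,cB4,cB5,cB6,cB7,cB8,cB9]
  try decide

theorem pvA6 (new : Int) (h1 : 400 < new) (h2 : new ≤ 444) : get_place new = ("5TH", 5) := by
  have cA0 : ¬((2111:Int) < new) := by omega
  have cA1 : ¬((555:Int) < new) := by omega
  have cA2 : ¬((500:Int) < new) := by omega
  have cA3 : ¬((444:Int) < new) := by omega
  have cA4 : ((400:Int) < new) := by omega
  have cA5 : ((333:Int) < new) := by omega
  have cA6 : ((323:Int) < new) := by omega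
  have cA7 : ((77:Int) < new) := by omega
  have cA8 : ((44:Int) < new) := by omega
  have cA9 : ((8:Int) < new) := by omega
  simp [get_place, pvHighscores, PySem.List.sorted_rev_eq_foldl_insertBy, PySem.List.insertBy,
    cA0,cA1,cA2,cA3,cA4,cA5,cA6,cA7,cA8,cA9, PySem.List.index?]
  try decide

theorem pvB6 (new : Int) (h1 : 400 < new) (h2 : new ≤ 444) : get_place_alt new = ("5TH", 5) := by
  have cB0 : (new ≤ (2111:Int)) := by omega
  have cB1 : (new ≤ (555:Int)) := by omega
  have cB2 : (new ≤ (500:Int)) := by omega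
  have cB3 : (new ≤ (444:Int)) := by omega
  have cB4 : ¬(new ≤ (400:Int)) := by omega
  have cB5 : ¬(new ≤ (333:Int)) := by omega
  have cB6 : ¬(new ≤ (323:Int)) := by omega
  have cB7 : ¬(new ≤ (77:Int)) := by omega
  have cB8 : ¬(new ≤ (44:Int)) := by omega
  have cB9 : ¬(new ≤ (8:Int)) := by omega
  simp [get_place_alt, pvHighscores, cB0,cB1,cB2,cB3,cB4,cB5,cB6,cB7,cB8,cB9]
  try decide

theorem pvA7 (new : Int) (h1 : 444 < new) (h2 : new ≤ 500) : get_place new = ("4TH", 4) := by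
  have cA0 : ¬((2111:Int) < new) := by omega
  have cA1 : ¬((555:Int) < new) := by omega
  have cA2 : ¬((500:Int) < new) := by omega
  have cA3 : ((444:Int) < new) := by omega
  have cA4 : ((400:Int) < new) := by omega
  have cA5 : ((333:Int) < new) := by omega
  have cA6 : ((323:Int) < new) := by omega
  have cA7 : ((77:Int) < new) := by omega
  have cA8 : ((44:Int) < new) := by omega
  have cA9 : ((8:Int) < new) := by omega
  simp [get_place, pvHighscores, PySem.List.sorted_rev_eq_foldl_insertBy, PySem.List.insertBy,
    cA0,cA1,cA2,cA3,cA4,cA5,cA6,cA7,cA8,cA9, PySem.List.index?]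
  try decide

theorem pvB7 (new : Int) (h1 : 444 < new) (h2 : new ≤ 500) : get_place_alt new = ("4TH", 4) := by
  have cB0 : (new ≤ (2111:Int)) := by omega
  have cB1 : (new ≤ (555:Int)) := by omega
  have cB2 : (new ≤ (500:Int)) := by omega
  have cB3 : ¬(new ≤ (444:Int)) := by omega
  have cB4 : ¬(new ≤ (400:Int)) := by omega
  have cB5 : ¬(new ≤ (333:Int)) := by omega
  have cB6 : ¬(new ≤ (323:Int)) := by omega
  have cB7 : ¬(new ≤ (77:Int)) := by omega
  have cB8 : ¬(new ≤ (44:Int)) := by omega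
  have cB9 : ¬(new ≤ (8:Int)) := by omega
  simp [get_place_alt, pvHighscores, cB0,cB1,cB2,cB3,cB4,cB5,cB6,cB7,cB8,cB9]
  try decide

theorem pvA8 (new : Int) (h1 : 500 < new) (h2 : new ≤ 555) : get_place new = ("3RD", 3) := by
  have cA0 : ¬((2111:Int) < new) := by omega
  have cA1 : ¬((555:Int) < new) := by omega
  have cA2 : ((500:Int) < new) := by omega
  have cA3 : ((444:Int) < new) := by omega
  have cA4 : ((400:Int) < new) := by omega
  have cA5 : ((333:Int) < new) := by omega
  have cA6 : ((323:Int) < new) := by omega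
  have cA7 : ((77:Int) < new) := by omega
  have cA8 : ((44:Int) < new) := by omega
  have cA9 : ((8:Int) < new) := by omega
  simp [get_place, pvHighscores, PySem.List.sorted_rev_eq_foldl_insertBy, PySem.List.insertBy,
    cA0,cA1,cA2,cA3,cA4,cA5,cA6,cA7,cA8,cA9, PySem.List.index?]
  try decide

theorem pvB8 (new : Int) (h1 : 500 < new) (h2 : new ≤ 555) : get_place_alt new = ("3RD", 3) := by
  have cB0 : (new ≤ (2111:Int)) := by omega
  have cB1 : (new ≤ (555:Int)) := by omega
  have cB2 : ¬(new ≤ (500:Int)) := by omega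
  have cB3 : ¬(new ≤ (444:Int)) := by omega
  have cB4 : ¬(new ≤ (400:Int)) := by omega
  have cB5 : ¬(new ≤ (333:Int)) := by omega
  have cB6 : ¬(new ≤ (323:Int)) := by omega
  have cB7 : ¬(new ≤ (77:Int)) := by omega
  have cB8 : ¬(new ≤ (44:Int)) := by omega
  have cB9 : ¬(new ≤ (8:Int)) := by omega
  simp [get_place_alt, pvHighscores, cB0,cB1,cB2,cB3,cB4,cB5,cB6,cB7,cB8,cB9]
  try decide

theorem pvA9 (new : Int) (h1 : 555 < new) (h2 : new ≤ 2111) : get_place new = ("2ND", 2) := by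
  have cA0 : ¬((2111:Int) < new) := by omega
  have cA1 : ((555:Int) < new) := by omega
  have cA2 : ((500:Int) < new) := by omega
  have cA3 : ((444:Int) < new) := by omega
  have cA4 : ((400:Int) < new) := by omega
  have cA5 : ((333:Int) < new) := by omega
  have cA6 : ((323:Int) < new) := by omega
  have cA7 : ((77:Int) < new) := by omega
  have cA8 : ((44:Int) < new) := by omega
  have cA9 : ((8:Int) < new) := by omega
  simp [get_place, pvHighscores, PySem.List.sorted_rev_eq_foldl_insertBy, PySem.List.insertBy,
    cA0,cA1,cA2,cA3,cA4,cA5,cA6,cA7,cA8,cA9, PySem.List.index?]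
  try decide

theorem pvB9 (new : Int) (h1 : 555 < new) (h2 : new ≤ 2111) : get_place_alt new = ("2ND", 2) := by
  have cB0 : (new ≤ (2111:Int)) := by omega
  have cB1 : ¬(new ≤ (555:Int)) := by omega
  have cB2 : ¬(new ≤ (500:Int)) := by omega
  have cB3 : ¬(new ≤ (444:Int)) := by omega
  have cB4 : ¬(new ≤ (400:Int)) := by omega
  have cB5 : ¬(new ≤ (333:Int)) := by omega
  have cB6 : ¬(new ≤ (323:Int)) := by omega
  have cB7 : ¬(new ≤ (77:Int)) := by omega
  have cB8 : ¬(new ≤ (44:Int)) := by omega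
  have cB9 : ¬(new ≤ (8:Int)) := by omega
  simp [get_place_alt, pvHighscores, cB0,cB1,cB2,cB3,cB4,cB5,cB6,cB7,cB8,cB9]
  try decide

theorem pvA10 (new : Int) (h1 : 2111 < new) : get_place new = ("1ST", 1) := by
  have cA0 : ((2111:Int) < new) := by omega
  have cA1 : ((555:Int) < new) := by omega
  have cA2 : ((500:Int) < new) := by omega
  have cA3 : ((444:Int) < new) := by omega
  have cA4 : ((400:Int) < new) := by omega
  have cA5 : ((333:Int) < new) := by omega
  have cA6 : ((323:Int) < new) := by omega
  have cA7 : ((77:Int) < new) := by omega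
  have cA8 : ((44:Int) < new) := by omega
  have cA9 : ((8:Int) < new) := by omega
  simp [get_place, pvHighscores, PySem.List.sorted_rev_eq_foldl_insertBy, PySem.List.insertBy,
    cA0,cA1,cA2,cA3,cA4,cA5,cA6,cA7,cA8,cA9, PySem.List.index?]
  try decide

theorem pvB10 (new : Int) (h1 : 2111 < new) : get_place_alt new = ("1ST", 1) := by
  have cB0 : ¬(new ≤ (2111:Int)) := by omega
  have cB1 : ¬(new ≤ (555:Int)) := by omega
  have cB2 : ¬(new ≤ (500:Int)) := by omega
  have cB3 : ¬(new ≤ (444:Int)) := by omega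
  have cB4 : ¬(new ≤ (400:Int)) := by omega
  have cB5 : ¬(new ≤ (333:Int)) := by omega
  have cB6 : ¬(new ≤ (323:Int)) := by omega
  have cB7 : ¬(new ≤ (77:Int)) := by omega
  have cB8 : ¬(new ≤ (44:Int)) := by omega
  have cB9 : ¬(new ≤ (8:Int)) := by omega
  simp [get_place_alt, pvHighscores, cB0,cB1,cB2,cB3,cB4,cB5,cB6,cB7,cB8,cB9]
  try decide

-- ===== VERDICT (by name: the statement is the Claim_ definition above) =====
theorem get_place_spec : Claim_equal_get_place := by
  intro new _
  unfold Spec_get_place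
  rcases (le_or_gt new (8:Int)) with h2 | h1
  · exact (pvA0 new h2).trans (pvB0 new h2).symm
  rcases (le_or_gt new (44:Int)) with h2 | h1
  · exact (pvA1 new h1 h2).trans (pvB1 new h1 h2).symm
  rcases (le_or_gt new (77:Int)) with h2 | h1
  · exact (pvA2 new h1 h2).trans (pvB2 new h1 h2).symm
  rcases (le_or_gt new (323:Int)) with h2 | h1
  · exact (pvA3 new h1 h2).trans (pvB3 new h1 h2).symm
  rcases (le_or_gt new (333:Int)) with h2 | h1
  · exact (pvA4 new h1 h2).trans (pvB4 new h1 h2).symm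
  rcases (le_or_gt new (400:Int)) with h2 | h1
  · exact (pvA5 new h1 h2).trans (pvB5 new h1 h2).symm
  rcases (le_or_gt new (444:Int)) with h2 | h1
  · exact (pvA6 new h1 h2).trans (pvB6 new h1 h2).symm
  rcases (le_or_gt new (500:Int)) with h2 | h1
  · exact (pvA7 new h1 h2).trans (pvB7 new h1 h2).symm
  rcases (le_or_gt new (555:Int)) with h2 | h1
  · exact (pvA8 new h1 h2).trans (pvB8 new h1 h2).symm
  rcases (le_or_gt new (2111:Int)) with h2 | h1
  · exact (pvA9 new h1 h2).trans (pvB9 new h1 h2).symm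
  exact (pvA10 new h1).trans (pvB10 new h1).symm
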